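-- pv_equiv track=rewrite | github.com/wzf2000/THUCS | 大三下/现代密码学/HW1/utils/utils.py | top_freq
-- ===== SOURCE A (Python) =====
-- N = 26
--
-- def num2ch(num: int) -> str:
--     return chr(ord('A') + num)
--
-- def calc_freq(cipher):
--     freq = {
--         num2ch(_): 0 for _ in range(26)
--     }
--     for ch in cipher:
--         freq[ch] += 1
--     return freq
--
-- def top_freq(cipher, length, top):
--     freq_list = []
--     for i in range(length):
--         freq = calc_freq(cipher[i::length])
--         freq = [ (freq[num2ch(_)], num2ch(_)) for _ in range(N) ]
--         freq.sort(reverse=True)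
--         freq_list.append(freq[:top])
--     return freq_list
-- ===== SOURCE B (Python) =====
-- def top_freq(cipher, length, top):
--     if length <= 0:
--         return []
--     buckets = [{chr(ord('A') + k): 0 for k in range(26)} for _ in range(length)]
--     for j, ch in enumerate(cipher):
--         buckets[j % length][ch] += 1
--     freq_list = []
--     for bucket in buckets:
--         freq = [(bucket[chr(ord('A') + k)], chr(ord('A') + k)) for k in range(26)]
--         freq.sort(reverse=True)
--         freq_list.append(freq[:top])
--     return freq_list
-- ===== Notes on version B (the rewrite author's own statement) =====
-- stated objective: alternative
-- what changed: Replaces A's `length` separate strided slice scans (cipher[i::length], each re-counted by calc_freq) with one sequential pass over cipher that increments per-position frequency buckets keyed by j % length; the per-position sort/top-slice stays identical.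
import Mathlib
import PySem

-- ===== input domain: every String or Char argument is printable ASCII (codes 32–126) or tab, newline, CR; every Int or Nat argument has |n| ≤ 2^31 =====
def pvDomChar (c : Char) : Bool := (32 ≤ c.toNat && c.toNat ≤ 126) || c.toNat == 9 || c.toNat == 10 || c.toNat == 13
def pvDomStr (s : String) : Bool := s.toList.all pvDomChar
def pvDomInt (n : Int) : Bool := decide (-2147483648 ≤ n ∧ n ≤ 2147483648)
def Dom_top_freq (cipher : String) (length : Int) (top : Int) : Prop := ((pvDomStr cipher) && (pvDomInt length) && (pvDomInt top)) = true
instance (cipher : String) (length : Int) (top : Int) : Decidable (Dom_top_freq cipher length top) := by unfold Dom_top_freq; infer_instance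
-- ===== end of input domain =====

-- B makes one sequential pass over cipher filling per-position buckets (index j % length) instead of A's
-- `length` separate strided slice scans; the per-position sort and top-slice are unchanged (objective: alternative).

-- ===== PORT A =====
-- Python dict keys are the 1-character strings 'A'..'Z'; they are represented by their Char here.
def num2ch (num : Int) : Char := Char.ofNat (65 + num.toNat)   -- chr(ord('A') + num)

def calcFreq (chars : List Char) : PySem.Dict Char Int :=
  chars.foldl (fun d ch => d.modify ch 0 (· + 1))              -- freq[ch] += 1 (KeyError outside Pre_)
    ((PySem.List.pyRange 0 26 1).foldl (fun d k => d.insert (num2ch k) 0) PySem.Dict.empty)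

def top_freq (cipher : String) (length : Int) (top : Int) : List (List (Int × String)) :=
  (PySem.List.pyRange 0 length 1).foldl (fun freq_list i =>
    -- cipher[i::length]: string slice, iterated over its characters (step ≠ 0 since 0 ≤ i < length)
    let freq := calcFreq ((PySem.List.slice? cipher.toList (some i) none length).getD [])
    let freqL := (PySem.List.pyRange 0 26 1).map
      (fun k => (freq.getD (num2ch k) 0, String.singleton (num2ch k)))
    freq_list ++ [PySem.List.slice (PySem.List.sorted2 freqL Prod.fst Prod.snd true) none (some top)]) []

-- ===== PORT B =====
def initBucket : PySem.Dict Char Int :=                        -- {chr(ord('A') + k): 0 for k in range(26)}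
  (PySem.List.pyRange 0 26 1).foldl (fun d k => d.insert (Char.ofNat (65 + k.toNat)) 0) PySem.Dict.empty

def top_freq_alt (cipher : String) (length : Int) (top : Int) : List (List (Int × String)) :=
  if length ≤ 0 then []
  else
    let buckets :=
      (PySem.List.enumerate cipher.toList 0).foldl             -- for j, ch in enumerate(cipher)
        (fun bs p => PySem.List.pySetD bs (PySem.Int.mod p.1 length)
          ((PySem.List.pyGetD bs (PySem.Int.mod p.1 length) initBucket).modify p.2 0 (· + 1)))
        (List.replicate length.toNat initBucket)
    buckets.foldl (fun freq_list bucket =>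
      let freq := (PySem.List.pyRange 0 26 1).map
        (fun k => (bucket.getD (Char.ofNat (65 + k.toNat)) 0, String.singleton (Char.ofNat (65 + k.toNat))))
      freq_list ++ [PySem.List.slice (PySem.List.sorted2 freq Prod.fst Prod.snd true) none (some top)]) []

-- ===== PRECONDITION & SPEC =====
-- A raises KeyError iff length > 0 and cipher contains a character outside 'A'..'Z'; exactly those inputs are excluded.
def Pre_top_freq (cipher : String) (length : Int) (top : Int) : Prop :=
  length ≤ 0 ∨ (cipher.toList.all (fun c => 65 ≤ c.toNat && c.toNat ≤ 90)) = true
instance (cipher : String) (length : Int) (top : Int) : Decidable (Pre_top_freq cipher length top) := by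
  unfold Pre_top_freq; infer_instance
def pvWitness_top_freq : String × Int × Int := ("ABA", 2, 1)

def Spec_top_freq (cipher : String) (length : Int) (top : Int) (out : List (List (Int × String))) : Prop := out = top_freq_alt cipher length top
instance (cipher : String) (length : Int) (top : Int) (out : List (List (Int × String))) : Decidable (Spec_top_freq cipher length top out) := by unfold Spec_top_freq; infer_instance

-- ===== CLAIM (what is proved, stated in full; the proofs are below) =====
def Claim_equal_top_freq : Prop := ∀ (cipher : String) (length : Int) (top : Int), Dom_top_freq cipher length top → Pre_top_freq cipher length top → Spec_top_freq cipher length top (top_freq cipher length top)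

-- ===== LEMMAS AND PROOFS =====

-- the characters of l (positions counted from s) sitting at positions ≡ i (mod L), in order
def selChars : List Char → Nat → Nat → Nat → List Char
  | [], _, _, _ => []
  | c :: t, s, i, L => (if s % L = i then [c] else []) ++ selChars t (s + 1) i L

-- every L-th character, starting with the head
def everyNth : List Char → Nat → List Char
  | [], _ => []
  | c :: t, L => c :: everyNth (t.drop (L - 1)) L
  termination_by l _ => l.length
  decreasing_by simp

lemma length_pySetD {α : Type} (xs : List α) (i : Int) (v : α) :
    (PySem.List.pySetD xs i v).length = xs.length := by
  cases h : PySem.List.pyIdx? xs.length i <;> simp [PySem.List.pySetD, PySem.List.pySet?, h]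

lemma foldF_length (L : Nat) (ps : List (Int × Char)) :
    ∀ bs : List (PySem.Dict Char Int),
      (ps.foldl (fun bs p => PySem.List.pySetD bs (PySem.Int.mod p.1 (L:Int))
        ((PySem.List.pyGetD bs (PySem.Int.mod p.1 (L:Int)) initBucket).modify p.2 0 (· + 1))) bs).length
      = bs.length := by
  induction ps with
  | nil => intro bs; rfl
  | cons p t ih => intro bs; rw [List.foldl_cons, ih, length_pySetD]

lemma succ_mod (s L : Nat) (hL : 0 < L) :
    (s + 1) % L = if s % L = L - 1 then 0 else s % L + 1 := by
  rcases Nat.lt_or_ge 1 L with h2 | h2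
  · rw [Nat.add_mod, Nat.mod_eq_of_lt h2]
    by_cases h : s % L = L - 1
    · rw [h]; simp [Nat.sub_add_cancel (by omega : 1 ≤ L)]
    · have := Nat.mod_lt s hL
      rw [Nat.mod_eq_of_lt (by omega), if_neg h]
  · interval_cases L
    simp [Nat.mod_one]

lemma proj (L : Nat) (hL : 0 < L) (i : Nat) (hi : i < L) :
    ∀ (l : List Char) (s : Nat) (bs : List (PySem.Dict Char Int)), bs.length = L →
    PySem.List.pyGetD ((PySem.List.enumerate l (s:Int)).foldl
      (fun bs p => PySem.List.pySetD bs (PySem.Int.mod p.1 (L:Int))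
        ((PySem.List.pyGetD bs (PySem.Int.mod p.1 (L:Int)) initBucket).modify p.2 0 (· + 1))) bs) (i:Int) initBucket
    = (selChars l s i L).foldl (fun d ch => d.modify ch 0 (· + 1)) (PySem.List.pyGetD bs (i:Int) initBucket) := by
  intro l
  induction l with
  | nil => intro s bs _; simp [selChars, PySem.List.enumerate]
  | cons c t ih =>
    intro s bs hbs
    rw [PySem.List.enumerate_cons, List.foldl_cons]
    simp only [PySem.Int.mod_natCast]
    rw [show ((s:Int) + 1) = ((s + 1 : Nat) : Int) by push_cast; ring]
    rw [ih (s + 1) _ (by rw [length_pySetD]; exact hbs)]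
    rw [PySem.List.pyGetD_pySetD_natCast _ _ _ _ _ (by rw [hbs]; exact Nat.mod_lt s hL)]
    rw [selChars]
    by_cases h : s % L = i
    · simp [h, List.foldl_cons]
    · simp [if_neg (Ne.symm h), if_neg h]

lemma selChars_eq (L : Nat) (hL : 0 < L) (i : Nat) (hi : i < L) :
    ∀ (l : List Char) (s : Nat),
      selChars l s i L = everyNth (l.drop (if s % L ≤ i then i - s % L else i + L - s % L)) L := by
  intro l
  induction l with
  | nil => intro s; simp [selChars, everyNth]
  | cons c t ih =>
    intro s
    have hm : s % L < L := Nat.mod_lt s hL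
    rw [selChars, ih (s + 1), succ_mod s L hL]
    by_cases h : s % L = i
    · have e1 : (if s % L ≤ i then i - s % L else i + L - s % L) = 0 := by
        rw [if_pos (by omega)]; omega
      have e2 : (if (if s % L = L - 1 then 0 else s % L + 1) ≤ i
          then i - (if s % L = L - 1 then 0 else s % L + 1)
          else i + L - (if s % L = L - 1 then 0 else s % L + 1)) = L - 1 := by
        split_ifs <;> omega
      rw [e1, e2, if_pos h, List.drop_zero, everyNth]
      rfl
    · have e : (if s % L ≤ i then i - s % L else i + L - s % L)
          = (if (if s % L = L - 1 then 0 else s % L + 1) ≤ i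
          then i - (if s % L = L - 1 then 0 else s % L + 1)
          else i + L - (if s % L = L - 1 then 0 else s % L + 1)) + 1 := by
        split_ifs <;> omega
      rw [if_neg h, e]
      simp

lemma pickAux (L : Nat) (hL : 0 < L) :
    ∀ (n : Nat) (l : List Char) (s : Nat), l.length - s ≤ n →
      (List.range (if s < l.length then (l.length - s + (L - 1)) / L else 0)).filterMap
        (fun k => l[s + L * k]?) = everyNth (l.drop s) L := by
  intro n
  induction n with
  | zero =>
    intro l s hb
    rw [if_neg (by omega), List.drop_eq_nil_of_le (by omega)]
    simp [everyNth]
  | succ n ih =>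
    intro l s hb
    by_cases hs : s < l.length
    · have hdrop : l.drop s = l[s] :: l.drop (s + 1) := List.drop_eq_getElem_cons hs
      have hcnt : (if s < l.length then (l.length - s + (L - 1)) / L else 0)
          = (l.length - s - 1) / L + 1 := by
        rw [if_pos hs, show l.length - s + (L - 1) = (l.length - s - 1) + L by omega,
          Nat.add_div_right _ hL]
      have hcnt' : (if s + L < l.length then (l.length - (s + L) + (L - 1)) / L else 0)
          = (l.length - s - 1) / L := by
        split_ifs with h2
        · congr 1; omega
        · rw [Nat.div_eq_of_lt (by omega)]
      have hstep : ∀ k ∈ List.range ((l.length - s - 1) / L),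
          l[s + L * (k + 1)]? = l[(s + L) + L * k]? := by
        intro k _; congr 1; ring
      rw [hcnt, List.range_succ_eq_map, List.filterMap_cons, List.filterMap_map]
      have h0 : l[s + L * 0]? = some l[s] := by
        rw [Nat.mul_zero, Nat.add_zero]; exact List.getElem?_eq_getElem hs
      rw [h0]
      have htail : List.filterMap ((fun k => l[s + L * k]?) ∘ Nat.succ)
          (List.range ((l.length - s - 1) / L)) = everyNth (l.drop (s + L)) L := by
        simp only [Function.comp_def, Nat.succ_eq_add_one]
        rw [List.filterMap_congr (fun k hk => hstep k hk), ← hcnt']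
        exact ih l (s + L) (by omega)
      rw [htail, hdrop, everyNth, List.drop_drop,
        show s + 1 + (L - 1) = s + L by omega]
    · rw [if_neg hs, List.drop_eq_nil_of_le (by omega)]
      simp [everyNth]

lemma slice_everyNth (l : List Char) (i L : Nat) (hL : 0 < L) :
    PySem.List.slice? l (some (i:Int)) none (L:Int) = some (everyNth (l.drop i) L) := by
  rw [← pickAux L hL l.length l i (by omega)]
  unfold PySem.List.slice? PySem.List.sliceIndices
  simp only [if_neg (show ¬ (L:Int) = 0 by omega), if_neg (show ¬ (L:Int) < 0 by omega),
    if_neg (show ¬ (i:Int) < 0 by omega), if_pos (show (0:Int) < (L:Int) by omega)]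
  by_cases hi : i < l.length
  · rw [min_eq_left (by exact_mod_cast Nat.le_of_lt hi), if_pos (by exact_mod_cast hi), if_pos hi]
    congr 1
    have hc : ((l.length : Int) - i + L - 1) = ((l.length - i + (L - 1) : Nat) : Int) := by
      push_cast; omega
    rw [hc, show ((l.length - i + (L - 1) : Nat) : Int) / (L:Int)
        = (((l.length - i + (L - 1)) / L : Nat) : Int) from (Int.natCast_div _ _).symm,
      Int.toNat_natCast]
    apply List.filterMap_congr
    intro k _
    rw [show ((i:Int) + L * k) = ((i + L * k : Nat) : Int) by push_cast; ring, Int.toNat_natCast]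
  · rw [min_eq_right (by omega), if_neg (by omega), if_neg hi]
    simp

-- ===== VERDICT (by name: the statement is the Claim_ definition above) =====
theorem top_freq_spec : Claim_equal_top_freq := by
  unfold Claim_equal_top_freq
  intro cipher length top _ _
  unfold Spec_top_freq
  by_cases hneg : length ≤ 0
  · rw [top_freq, top_freq_alt, if_pos hneg,
      show PySem.List.pyRange 0 length 1 = [] from PySem.List.pyRange_one_eq_nil hneg]
    rfl
  · replace hneg : 0 < length := by omega
    set L := length.toNat with hLdef
    have hL0 : 0 < L := by omega
    have hcast : length = (L:Int) := by omega
    rw [top_freq, top_freq_alt, if_neg (not_le.mpr hneg), hcast]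
    simp only [Int.toNat_natCast]
    rw [PySem.List.foldl_append_singleton_eq_map, PySem.List.foldl_append_singleton_eq_map]
    simp only [List.nil_append]
    apply List.ext_getElem
    · simp [PySem.List.length_pyRange_one, foldF_length]
    · intro n h1 h2
      simp only [List.getElem_map]
      have hn : n < L := by simpa [PySem.List.length_pyRange_one] using h1
      have hidx : (PySem.List.pyRange 0 (L:Int) 1)[n]'(by
          simpa [PySem.List.length_pyRange_one] using hn) = ((n:Nat):Int) := by
        rw [PySem.List.getElem_pyRange_one]; simp
      rw [hidx, slice_everyNth cipher.toList n L hL0, Option.getD_some]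
      have hlenf : (List.foldl
          (fun bs p => PySem.List.pySetD bs (PySem.Int.mod p.1 (L:Int))
            ((PySem.List.pyGetD bs (PySem.Int.mod p.1 (L:Int)) initBucket).modify p.2 0 (· + 1)))
          (List.replicate L initBucket) (PySem.List.enumerate cipher.toList 0)).length = L := by
        rw [foldF_length]; simp
      have hdict : (List.foldl
          (fun bs p => PySem.List.pySetD bs (PySem.Int.mod p.1 (L:Int))
            ((PySem.List.pyGetD bs (PySem.Int.mod p.1 (L:Int)) initBucket).modify p.2 0 (· + 1)))
          (List.replicate L initBucket) (PySem.List.enumerate cipher.toList 0))[n]'(by omega)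
          = calcFreq (everyNth (cipher.toList.drop n) L) := by
        have hp := proj L hL0 n hn cipher.toList 0 (List.replicate L initBucket) (by simp)
        simp only [Nat.cast_zero] at hp
        have hsel := selChars_eq L hL0 n hn cipher.toList 0
        simp only [Nat.zero_mod, Nat.zero_le, if_pos, Nat.sub_zero] at hsel
        rw [show (List.foldl
            (fun bs p => PySem.List.pySetD bs (PySem.Int.mod p.1 (L:Int))
              ((PySem.List.pyGetD bs (PySem.Int.mod p.1 (L:Int)) initBucket).modify p.2 0 (· + 1)))
            (List.replicate L initBucket) (PySem.List.enumerate cipher.toList 0))[n]'(by omega)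
            = PySem.List.pyGetD (List.foldl
            (fun bs p => PySem.List.pySetD bs (PySem.Int.mod p.1 (L:Int))
              ((PySem.List.pyGetD bs (PySem.Int.mod p.1 (L:Int)) initBucket).modify p.2 0 (· + 1)))
            (List.replicate L initBucket) (PySem.List.enumerate cipher.toList 0)) ((n:Nat):Int) initBucket
          from by rw [PySem.List.pyGetD_natCast, List.getD_eq_getElem]]
        rw [hp, hsel]
        rw [show PySem.List.pyGetD (List.replicate L initBucket) ((n:Nat):Int) initBucket = initBucket from by
          rw [PySem.List.pyGetD_natCast, List.getD_eq_getElem _ _ (by simpa using hn)]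
          simp]
        rfl
      rw [hdict]
      simp only [num2ch]
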